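-- pv_equiv track=rewrite | github.com/edouardmulliez/adventofcode | 2019/aoc_2019/day10/day10.py | get_max_visible_asteroids
-- ===== SOURCE A (Python) =====
-- def pgcd(a,b):
--     if b==0:
--         return a
--     else:
--         r = a % b
--         return pgcd(b,r)
--
-- FULL = '#'
--
-- def count_visible_asteroids(map, row, col, nb_row, nb_col):
--     if map[row][col] != FULL:
--         return 0
--     directions = set()
--     for i in range(nb_row):
--         for j in range(nb_col):
--             if i != row or j != col:
--                 if map[i][j] == FULL:
--                     row_diff = i - row
--                     col_diff = j - col
--                     d = pgcd(abs(row_diff), abs(col_diff))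
--                     directions.add((row_diff // d, col_diff // d))
--
--     return len(directions)
--
-- def get_max_visible_asteroids(map):
--     nb_row = len(map)
--     nb_col = len(map[0])
--     max_nb_asteroids = 0
--     max_position = None
--     for i in range(nb_row):
--         for j in range(nb_col):
--             nb_asteroids = count_visible_asteroids(map, i, j, nb_row, nb_col)
--             if nb_asteroids > max_nb_asteroids:
--                 max_nb_asteroids = nb_asteroids
--                 max_position = (i, j)
--
--     return max_nb_asteroids, max_position
-- ===== SOURCE B (Python) =====
-- def _gcd(a, b):
--     while b:
--         a, b = b, a % b
--     return a
--
-- def _dir(p, q):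
--     dr = q[0] - p[0]
--     dc = q[1] - p[1]
--     g = _gcd(abs(dr), abs(dc))
--     return (dr // g, dc // g)
--
-- def _visible(asteroids, p):
--     return len({_dir(p, q) for q in asteroids if q != p})
--
-- def get_max_visible_asteroids(map):
--     nb_col = len(map[0])
--     asteroids = [(i, j)
--                  for i, row in enumerate(map)
--                  for j, ch in enumerate(row[:nb_col])
--                  if ch == '#']
--     best = 0
--     best_pos = None
--     for p in asteroids:
--         n = _visible(asteroids, p)
--         if n > best:
--             best = n
--             best_pos = p
--     return best, best_pos
-- ===== Notes on version B (the rewrite author's own statement) =====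
-- stated objective: alternative
-- what changed: A tests every grid cell against every other grid cell (directions via a recursive gcd); B first collects the asteroid coordinates in one scan and then compares asteroids pairwise only, tracking the running maximum over that list.
-- outside the precondition, e.g. on get_max_visible_asteroids(['..', '..']): A returns (0, None), B returns (0, None); on get_max_visible_asteroids(['#.', '..']): A returns (0, None), B returns (0, None)
import Mathlib
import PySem

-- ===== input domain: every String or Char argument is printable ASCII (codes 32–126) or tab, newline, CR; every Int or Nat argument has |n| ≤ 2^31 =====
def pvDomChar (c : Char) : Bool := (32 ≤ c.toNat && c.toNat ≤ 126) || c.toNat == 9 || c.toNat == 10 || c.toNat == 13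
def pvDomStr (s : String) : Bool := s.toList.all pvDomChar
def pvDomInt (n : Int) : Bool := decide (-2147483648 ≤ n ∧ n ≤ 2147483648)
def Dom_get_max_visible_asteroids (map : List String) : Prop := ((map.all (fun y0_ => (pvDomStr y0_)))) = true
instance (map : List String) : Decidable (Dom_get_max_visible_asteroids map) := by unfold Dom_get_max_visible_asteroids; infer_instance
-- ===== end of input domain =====

-- B replaces A's all-cells × all-cells scan by one pass collecting the asteroid coordinates
-- followed by a pairwise comparison of asteroids only (a different traversal; timing unverified).

-- ===== PORT A =====

-- A's recursive pgcd; fuel (natAbs of the divisor, which strictly decreases) only makes the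
-- same computation total — it is never exhausted on the calls A makes.
def pgcdFuel : Nat → Int → Int → Int
  | 0, a, _ => a
  | f + 1, a, b => if b = 0 then a else pgcdFuel f b (PySem.Int.mod a b)

def pgcd (a b : Int) : Int := pgcdFuel (b.natAbs + 1) a b

def FULL : Char := '#'

-- map[row][col] exactly as A indexes it (none = IndexError; in-range under Pre_)
def pvCellA (map : List String) (i j : Int) : Option Char :=
  (PySem.List.pyGet? map i).bind (fun s => PySem.Str.pyGet? s j)

def count_visible_asteroids (map : List String) (row col nb_row nb_col : Int) : Int :=
  if pvCellA map row col ≠ some FULL then 0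
  else
    let directions :=
      (PySem.List.pyRange 0 nb_row 1).foldl (fun ds i =>
        (PySem.List.pyRange 0 nb_col 1).foldl (fun ds j =>
          if i ≠ row ∨ j ≠ col then
            if pvCellA map i j = some FULL then
              let row_diff := i - row
              let col_diff := j - col
              let d := pgcd |row_diff| |col_diff|
              PySem.Set.add ds (PySem.Int.floordiv row_diff d, PySem.Int.floordiv col_diff d)
            else ds
          else ds) ds)
        (PySem.Set.empty : PySem.Set (Int × Int))
    PySem.Set.len directions

def get_max_visible_asteroids (map : List String) : Int × (Int × Int) :=
  let nb_row : Int := map.length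
  -- len(map[0]): A raises IndexError on []; excluded by Pre_
  let nb_col : Int := match map with | [] => 0 | s :: _ => PySem.Str.len s
  let st :=
    (PySem.List.pyRange 0 nb_row 1).foldl (fun st i =>
      (PySem.List.pyRange 0 nb_col 1).foldl (fun st j =>
        let nb_asteroids := count_visible_asteroids map i j nb_row nb_col
        if nb_asteroids > st.1 then (nb_asteroids, some (i, j)) else st) st)
      ((0 : Int), (none : Option (Int × Int)))
  -- A returns (0, None) when no asteroid sees another; None is excluded by Pre_
  (st.1, st.2.getD (0, 0))

-- ===== PORT B =====

-- Source B's while-loop _gcd; same fuel discipline as above, exact on the nonnegative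
-- arguments B feeds it (Python's % = Nat.mod there)
def pvGcdFuel : Nat → Nat → Nat → Nat
  | 0, a, _ => a
  | f + 1, a, b => if b = 0 then a else pvGcdFuel f b (a % b)

def pvGcd (a b : Nat) : Nat := pvGcdFuel (b + 1) a b

-- Source B's _dir(p, q); abs = Int.natAbs on the Nat side
def pvDir (p q : Int × Int) : Int × Int :=
  let dr := q.1 - p.1
  let dc := q.2 - p.2
  let g : Int := ((pvGcd dr.natAbs dc.natAbs : Nat) : Int)
  (PySem.Int.floordiv dr g, PySem.Int.floordiv dc g)

-- Source B's _visible(asteroids, p); the set comprehension is a fold of Set.add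
def pvVisible (asteroids : List (Int × Int)) (p : Int × Int) : Int :=
  PySem.Set.len (asteroids.foldl
    (fun ds q => if q ≠ p then PySem.Set.add ds (pvDir p q) else ds)
    (PySem.Set.empty : PySem.Set (Int × Int)))

def get_max_visible_asteroids_alt (map : List String) : Int × (Int × Int) :=
  -- len(map[0]): raises on []; excluded by Pre_
  let nb_col : Int := match map with | [] => 0 | s :: _ => PySem.Str.len s
  let asteroids : List (Int × Int) :=
    (PySem.List.enumerate map 0).flatMap (fun ir =>
      (PySem.List.enumerate (PySem.Chars.slice ir.2.toList none (some nb_col)) 0).filterMap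
        (fun jc => if jc.2 = '#' then some (ir.1, jc.1) else none))
  let st := asteroids.foldl (fun st p =>
      let nb := pvVisible asteroids p
      if nb > st.1 then (nb, some p) else st)
    ((0 : Int), (none : Option (Int × Int)))
  (st.1, st.2.getD (0, 0))

-- ===== PRECONDITION & SPEC =====
-- Pre_ excludes (a) the inputs on which A raises IndexError — the empty map and maps with a row
-- shorter than the first row — and (b) maps with fewer than two asteroids, on which A returns
-- (0, None): None is not a value of the declared result type Int × Int.
def Pre_get_max_visible_asteroids (map : List String) : Prop :=
  map ≠ [] ∧
  (∀ r ∈ map, (map.headD "").toList.length ≤ r.toList.length) ∧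
  2 ≤ (map.map (fun r => (r.toList.take (map.headD "").toList.length).count '#')).sum
instance (map : List String) : Decidable (Pre_get_max_visible_asteroids map) := by
  unfold Pre_get_max_visible_asteroids; infer_instance

def pvWitness_get_max_visible_asteroids : List String := ["##", ".#"]

def Spec_get_max_visible_asteroids (map : List String) (out : Int × (Int × Int)) : Prop := out = get_max_visible_asteroids_alt map
instance (map : List String) (out : Int × (Int × Int)) : Decidable (Spec_get_max_visible_asteroids map out) := by unfold Spec_get_max_visible_asteroids; infer_instance

-- ===== CLAIM (what is proved, stated in full; the proofs are below) =====
def Claim_equal_get_max_visible_asteroids : Prop := ∀ (map : List String), Dom_get_max_visible_asteroids map → Pre_get_max_visible_asteroids map → Spec_get_max_visible_asteroids map (get_max_visible_asteroids map)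

-- ===== LEMMAS AND PROOFS =====

-- the two gcds agree on casts of naturals
theorem pv_gcdFuel_cast : ∀ (f a b : Nat), pgcdFuel f (a : Int) (b : Int) = ((pvGcdFuel f a b : Nat) : Int)
  | 0, _, _ => rfl
  | f + 1, a, b => by
    simp only [pgcdFuel, pvGcdFuel]
    by_cases hb : b = 0
    · simp [hb]
    · rw [if_neg (by exact_mod_cast hb), if_neg hb, PySem.Int.mod_natCast]
      exact pv_gcdFuel_cast f b (a % b)

theorem pv_dir_gcd (x y : Int) : pgcd |x| |y| = ((pvGcd x.natAbs y.natAbs : Nat) : Int) := by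
  unfold pgcd pvGcd
  rw [Int.abs_eq_natAbs x, Int.abs_eq_natAbs y, Int.natAbs_natCast]
  exact pv_gcdFuel_cast (y.natAbs + 1) x.natAbs y.natAbs

-- enumerate unfolding
theorem pv_enum_cons {α : Type} (x : α) (xs : List α) (k : Int) :
    PySem.List.enumerate (x :: xs) k = (k, x) :: PySem.List.enumerate xs (k + 1) := by
  simp [PySem.List.enumerate]

-- a loop over enumerate(xs) is a loop over range(len(xs)) with default-indexed access
theorem pv_enum_flatMap {α β : Type} (d : α) : ∀ (xs : List α) (k : Int) (F : Int × α → List β),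
    (PySem.List.enumerate xs k).flatMap F
      = (List.range xs.length).flatMap (fun (i : Nat) => F ((k + (i : Int)), xs.getD i d))
  | [], k, F => by simp
  | x :: xs, k, F => by
    rw [pv_enum_cons, List.flatMap_cons, pv_enum_flatMap d xs (k + 1) F,
      List.length_cons, List.range_succ_eq_map, List.flatMap_cons, List.flatMap_map]
    have h0 : F (k + ((0 : Nat) : Int), (x :: xs).getD 0 d) = F (k, x) := by
      rw [show k + ((0 : Nat) : Int) = k by simp, List.getD_cons_zero]
    have h2 : (fun (a : Nat) => F (k + ((Nat.succ a : Nat) : Int), (x :: xs).getD (Nat.succ a) d))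
        = fun (a : Nat) => F (k + 1 + (a : Int), xs.getD a d) := by
      funext a
      have h1 : k + ((Nat.succ a : Nat) : Int) = k + 1 + (a : Int) := by push_cast; ring
      rw [List.getD_cons_succ, h1]
    rw [h0, h2]

theorem pv_enum_filterMap {α β : Type} (d : α) : ∀ (xs : List α) (k : Int) (G : Int × α → Option β),
    (PySem.List.enumerate xs k).filterMap G
      = (List.range xs.length).filterMap (fun (i : Nat) => G ((k + (i : Int)), xs.getD i d))
  | [], k, G => by simp
  | x :: xs, k, G => by
    rw [pv_enum_cons, List.filterMap_cons, pv_enum_filterMap d xs (k + 1) G,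
      List.length_cons, List.range_succ_eq_map, List.filterMap_cons, List.filterMap_map]
    have h0 : G (k + ((0 : Nat) : Int), (x :: xs).getD 0 d) = G (k, x) := by
      rw [show k + ((0 : Nat) : Int) = k by simp, List.getD_cons_zero]
    have h2 : ((fun (i : Nat) => G (k + (i : Int), (x :: xs).getD i d)) ∘ Nat.succ)
        = fun (i : Nat) => G (k + 1 + (i : Int), xs.getD i d) := by
      funext i
      simp only [Function.comp]
      have h1 : k + ((i + 1 : Nat) : Int) = k + 1 + (i : Int) := by push_cast; ring
      rw [List.getD_cons_succ, h1]
    rw [h0, h2]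

-- filterMap with an if-some-else-none body is filter-then-map
theorem pv_filterMap_ite {α β : Type} (p : α → Prop) [DecidablePred p] (f : α → β) (l : List α) :
    l.filterMap (fun x => if p x then some (f x) else none)
      = (l.filter (fun x => decide (p x))).map f := by
  induction l with
  | nil => rfl
  | cons x t ih => by_cases h : p x <;> simp [h, ih]

theorem pv_getD_take {α : Type} (cs : List α) (w j : Nat) (d : α) (hj : j < w) :
    (cs.take w).getD j d = cs.getD j d := by
  by_cases h : j < cs.length
  · rw [List.getD_eq_getElem _ _ (by simp [List.length_take]; omega),
      List.getD_eq_getElem _ _ h]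
    exact List.getElem_take
  · rw [List.getD_eq_getElem?_getD, List.getD_eq_getElem?_getD,
      List.getElem?_eq_none (by simp [List.length_take]; omega),
      List.getElem?_eq_none (by omega)]

-- map[i][j] for in-range Nat indices
theorem pv_cell_char (map : List String) (i j : Nat) (hi : i < map.length)
    (hj : j < (map.getD i "").toList.length) :
    pvCellA map ((i : Nat) : Int) ((j : Nat) : Int)
      = some ((map.getD i "").toList.getD j ' ') := by
  unfold pvCellA
  rw [PySem.List.pyGet?_natCast, List.getElem?_eq_getElem hi]
  have hgd : map.getD i "" = map[i] := List.getD_eq_getElem map "" hi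
  rw [hgd] at hj ⊢
  show PySem.Str.pyGet? map[i] (j : Int) = _
  rw [show PySem.Str.pyGet? map[i] (j : Int) = PySem.List.pyGet? map[i].toList (j : Int) from rfl,
    PySem.List.pyGet?_natCast, List.getElem?_eq_getElem hj, List.getD_eq_getElem _ _ hj]

-- the grid as a row-major list of coordinates
def pvCells (n w : Nat) : List (Int × Int) :=
  (List.range n).flatMap (fun (i : Nat) => (List.range w).map (fun (j : Nat) => ((i : Int), (j : Int))))

theorem pv_nested_foldl {δ : Type} (n w : Nat) (f : δ → Int × Int → δ) (init : δ) :
    (PySem.List.pyRange 0 (n : Int) 1).foldl (fun d i =>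
      (PySem.List.pyRange 0 (w : Int) 1).foldl (fun d j => f d (i, j)) d) init
    = (pvCells n w).foldl f init := by
  simp [pvCells, List.foldl_flatMap, PySem.List.pyRange_zero_nat, List.foldl_map]

-- one row of B's asteroid comprehension = that row's cells filtered by '#'
theorem pv_row_eq (map : List String) (i w : Nat) (hi : i < map.length)
    (hr : w ≤ (map.getD i "").toList.length) :
    (PySem.List.enumerate (PySem.Chars.slice (map.getD i "").toList none (some ((w : Nat) : Int))) 0).filterMap
        (fun jc => if jc.2 = '#' then some (((i : Nat) : Int), jc.1) else none)
      = ((List.range w).map (fun (j : Nat) => ((i : Int), (j : Int)))).filter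
          (fun q => decide (pvCellA map q.1 q.2 = some FULL)) := by
  have hslice : PySem.Chars.slice (map.getD i "").toList none (some ((w : Nat) : Int))
      = (map.getD i "").toList.take w := by
    rw [show PySem.Chars.slice (map.getD i "").toList none (some ((w : Nat) : Int))
        = PySem.List.slice (map.getD i "").toList none (some ((w : Nat) : Int)) from rfl,
      PySem.List.slice_to _ (by positivity)]
    simp
  rw [hslice, pv_enum_filterMap ' ']
  simp only [zero_add]
  rw [List.length_take, Nat.min_eq_left hr,
    pv_filterMap_ite (fun j : Nat => ((map.getD i "").toList.take w).getD j ' ' = '#')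
      (fun j : Nat => (((i : Nat) : Int), ((j : Nat) : Int))),
    List.filter_map]
  refine congrArg _ (List.filter_congr fun j hj => ?_)
  have hj' : j < w := List.mem_range.mp hj
  simp only [Function.comp]
  rw [pv_getD_take _ _ _ _ hj', pv_cell_char map i j hi (lt_of_lt_of_le hj' hr)]
  exact decide_eq_decide.mpr (by simp [FULL])

-- B's asteroid list = the grid cells filtered by '#'
theorem pv_asts_eq (s : String) (t : List String)
    (hw : ∀ r ∈ s :: t, s.toList.length ≤ r.toList.length) :
    (PySem.List.enumerate (s :: t) 0).flatMap (fun ir =>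
        (PySem.List.enumerate (PySem.Chars.slice ir.2.toList none (some ((s.toList.length : Nat) : Int))) 0).filterMap
          (fun jc => if jc.2 = '#' then some (ir.1, jc.1) else none))
      = (pvCells (s :: t).length s.toList.length).filter
          (fun q => decide (pvCellA (s :: t) q.1 q.2 = some FULL)) := by
  rw [pv_enum_flatMap ""]
  simp only [pvCells]
  rw [List.filter_flatMap]
  simp only [zero_add]
  calc (List.range (s :: t).length).flatMap (fun (i : Nat) =>
          (PySem.List.enumerate (PySem.Chars.slice (((s :: t)).getD i "").toList none (some ((s.toList.length : Nat) : Int))) 0).filterMap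
            (fun jc => if jc.2 = '#' then some (((i : Nat) : Int), jc.1) else none))
      = (List.range (s :: t).length).foldl (fun (acc : List (Int × Int)) (i : Nat) => acc ++
          (PySem.List.enumerate (PySem.Chars.slice (((s :: t)).getD i "").toList none (some ((s.toList.length : Nat) : Int))) 0).filterMap
            (fun jc => if jc.2 = '#' then some (((i : Nat) : Int), jc.1) else none)) [] := by
        rw [PySem.List.foldl_append_eq_flatMap]; rfl
    _ = (List.range (s :: t).length).foldl (fun (acc : List (Int × Int)) (i : Nat) => acc ++
          ((List.range s.toList.length).map (fun (j : Nat) => ((i : Int), (j : Int)))).filter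
            (fun q => decide (pvCellA (s :: t) q.1 q.2 = some FULL))) [] := by
        refine PySem.List.foldl_congr_mem _ _ _ _ (fun acc i hi => ?_)
        have hi' : i < (s :: t).length := List.mem_range.mp hi
        have hmem : (s :: t).getD i "" ∈ s :: t := by
          rw [List.getD_eq_getElem _ "" hi']; exact List.getElem_mem _
        rw [pv_row_eq (s :: t) i s.toList.length hi' (hw _ hmem)]
    _ = (List.range (s :: t).length).flatMap (fun (i : Nat) =>
          ((List.range s.toList.length).map (fun (j : Nat) => ((i : Int), (j : Int)))).filter
            (fun q => decide (pvCellA (s :: t) q.1 q.2 = some FULL))) := by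
        rw [PySem.List.foldl_append_eq_flatMap]; rfl

-- A's per-cell count = B's visibility count over the filtered cell list
theorem pv_count_eq (map : List String) (n w : Nat) (p : Int × Int)
    (hp : pvCellA map p.1 p.2 = some FULL) :
    count_visible_asteroids map p.1 p.2 (n : Int) (w : Int)
      = pvVisible ((pvCells n w).filter (fun q => decide (pvCellA map q.1 q.2 = some FULL))) p := by
  have hc0 : count_visible_asteroids map p.1 p.2 (n : Int) (w : Int)
      = PySem.Set.len ((PySem.List.pyRange 0 (n : Int) 1).foldl (fun ds i =>
          (PySem.List.pyRange 0 (w : Int) 1).foldl (fun ds j =>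
            (fun (ds : PySem.Set (Int × Int)) (q : Int × Int) =>
              if q.1 ≠ p.1 ∨ q.2 ≠ p.2 then
                if pvCellA map q.1 q.2 = some FULL then
                  PySem.Set.add ds (PySem.Int.floordiv (q.1 - p.1) (pgcd |q.1 - p.1| |q.2 - p.2|),
                    PySem.Int.floordiv (q.2 - p.2) (pgcd |q.1 - p.1| |q.2 - p.2|))
                else ds
              else ds) ds (i, j)) ds)
          (PySem.Set.empty : PySem.Set (Int × Int))) := by
    unfold count_visible_asteroids
    rw [if_neg (by simp [hp])]
  rw [hc0]
  refine Eq.trans (congrArg PySem.Set.len (pv_nested_foldl n w (fun (ds : PySem.Set (Int × Int)) (q : Int × Int) =>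
    if q.1 ≠ p.1 ∨ q.2 ≠ p.2 then
      if pvCellA map q.1 q.2 = some FULL then
        PySem.Set.add ds (PySem.Int.floordiv (q.1 - p.1) (pgcd |q.1 - p.1| |q.2 - p.2|),
          PySem.Int.floordiv (q.2 - p.2) (pgcd |q.1 - p.1| |q.2 - p.2|))
      else ds
    else ds) (PySem.Set.empty : PySem.Set (Int × Int)))) ?_
  have hbody : ((pvCells n w).foldl (fun (ds : PySem.Set (Int × Int)) (q : Int × Int) =>
        if q.1 ≠ p.1 ∨ q.2 ≠ p.2 then
          if pvCellA map q.1 q.2 = some FULL then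
            PySem.Set.add ds (PySem.Int.floordiv (q.1 - p.1) (pgcd |q.1 - p.1| |q.2 - p.2|),
              PySem.Int.floordiv (q.2 - p.2) (pgcd |q.1 - p.1| |q.2 - p.2|))
          else ds
        else ds) (PySem.Set.empty : PySem.Set (Int × Int)))
      = ((pvCells n w).foldl (fun ds q =>
          if (¬ q = p) ∧ pvCellA map q.1 q.2 = some FULL then PySem.Set.add ds (pvDir p q) else ds)
        (PySem.Set.empty : PySem.Set (Int × Int))) := by
    refine PySem.List.foldl_congr_mem _ _ _ _ (fun ds q _ => ?_)
    by_cases hqp : q = p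
    · subst hqp
      rw [if_neg (by simp), if_neg (by simp)]
    · have hor : q.1 ≠ p.1 ∨ q.2 ≠ p.2 := by
        rw [Prod.ext_iff] at hqp; tauto
      rw [if_pos hor]
      by_cases hc : pvCellA map q.1 q.2 = some FULL
      · rw [if_pos hc, if_pos ⟨hqp, hc⟩, pv_dir_gcd]
        rfl
      · rw [if_neg hc, if_neg (by tauto)]
  rw [hbody]
  calc PySem.Set.len ((pvCells n w).foldl (fun ds q =>
          if (¬ q = p) ∧ pvCellA map q.1 q.2 = some FULL then PySem.Set.add ds (pvDir p q) else ds)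
        (PySem.Set.empty : PySem.Set (Int × Int)))
      = PySem.Set.len (((pvCells n w).filter
            (fun q => decide ((¬ q = p) ∧ pvCellA map q.1 q.2 = some FULL))).foldl
          (fun ds q => PySem.Set.add ds (pvDir p q)) (PySem.Set.empty : PySem.Set (Int × Int))) :=
        congrArg _ (PySem.List.foldl_ite_eq_foldl_filter
          (fun q => (¬ q = p) ∧ pvCellA map q.1 q.2 = some FULL)
          (fun ds q => PySem.Set.add ds (pvDir p q)) (pvCells n w) _)
    _ = PySem.Set.len ((((pvCells n w).filter
            (fun q => decide (pvCellA map q.1 q.2 = some FULL))).filter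
            (fun q => decide (¬ q = p))).foldl
          (fun ds q => PySem.Set.add ds (pvDir p q)) (PySem.Set.empty : PySem.Set (Int × Int))) := by
        refine congrArg _ (congrArg (fun l => List.foldl _ _ l) ?_)
        rw [List.filter_filter]
        exact List.filter_congr fun q _ => by simp
    _ = pvVisible ((pvCells n w).filter (fun q => decide (pvCellA map q.1 q.2 = some FULL))) p :=
        (congrArg PySem.Set.len (PySem.List.foldl_ite_eq_foldl_filter
          (fun q => q ≠ p) (fun ds q => PySem.Set.add ds (pvDir p q))
          ((pvCells n w).filter (fun q => decide (pvCellA map q.1 q.2 = some FULL))) _)).symm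

-- A's max-tracking step
def pvStepA (map : List String) (nr nc : Int) (st : Int × Option (Int × Int)) (q : Int × Int) :
    Int × Option (Int × Int) :=
  if count_visible_asteroids map q.1 q.2 nr nc > st.1
  then (count_visible_asteroids map q.1 q.2 nr nc, some q) else st

theorem pv_count_nonneg (map : List String) (r c nr nc : Int) :
    0 ≤ count_visible_asteroids map r c nr nc := by
  unfold count_visible_asteroids
  split
  · exact le_refl 0
  · simp only [PySem.Set.len]
    exact Int.natCast_nonneg _

theorem pv_step_fst_nonneg (map : List String) (nr nc : Int) (st : Int × Option (Int × Int))
    (q : Int × Int) (h : 0 ≤ st.1) : 0 ≤ (pvStepA map nr nc st q).1 := by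
  unfold pvStepA
  split
  · exact pv_count_nonneg map q.1 q.2 nr nc
  · exact h

-- cells that are not '#' contribute count 0 and never beat a nonnegative max
theorem pv_skip (map : List String) (nr nc : Int) :
    ∀ (l : List (Int × Int)) (st : Int × Option (Int × Int)), 0 ≤ st.1 →
      l.foldl (pvStepA map nr nc) st
        = (l.filter (fun q => decide (pvCellA map q.1 q.2 = some FULL))).foldl
            (pvStepA map nr nc) st := by
  intro l
  induction l with
  | nil => intro st _; rfl
  | cons q l ih =>
    intro st h
    by_cases hc : pvCellA map q.1 q.2 = some FULL
    · rw [List.foldl_cons, List.filter_cons_of_pos (by simpa using hc), List.foldl_cons]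
      exact ih _ (pv_step_fst_nonneg map nr nc st q h)
    · rw [List.foldl_cons, List.filter_cons_of_neg (by simpa using hc)]
      have hstep : pvStepA map nr nc st q = st := by
        unfold pvStepA
        have h0 : count_visible_asteroids map q.1 q.2 nr nc = 0 := by
          unfold count_visible_asteroids
          rw [if_pos hc]
        rw [h0, if_neg (by omega)]
      rw [hstep]
      exact ih st h

-- ===== VERDICT (by name: the statement is the Claim_ definition above) =====
theorem get_max_visible_asteroids_spec : Claim_equal_get_max_visible_asteroids := by
  intro map hdom hpre
  obtain ⟨hne, hwle, -⟩ := hpre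
  obtain ⟨s, t, rfl⟩ := List.exists_cons_of_ne_nil hne
  unfold Spec_get_max_visible_asteroids
  have hwle' : ∀ r ∈ s :: t, s.toList.length ≤ r.toList.length := by simpa using hwle
  have hfold : ((pvCells (s :: t).length s.toList.length).filter
        (fun q => decide (pvCellA (s :: t) q.1 q.2 = some FULL))).foldl
        (pvStepA (s :: t) ((s :: t).length : Int) ((s.toList.length : Nat) : Int))
        ((0 : Int), (none : Option (Int × Int)))
      = ((pvCells (s :: t).length s.toList.length).filter
        (fun q => decide (pvCellA (s :: t) q.1 q.2 = some FULL))).foldl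
        (fun st p => if pvVisible ((pvCells (s :: t).length s.toList.length).filter
            (fun q => decide (pvCellA (s :: t) q.1 q.2 = some FULL))) p > st.1
          then (pvVisible ((pvCells (s :: t).length s.toList.length).filter
            (fun q => decide (pvCellA (s :: t) q.1 q.2 = some FULL))) p, some p) else st)
        ((0 : Int), (none : Option (Int × Int))) := by
    refine PySem.List.foldl_congr_mem _ _ _ _ (fun st q hq => ?_)
    have hp : pvCellA (s :: t) q.1 q.2 = some FULL :=
      of_decide_eq_true (List.mem_filter.mp hq).2
    show pvStepA (s :: t) ((s :: t).length : Int) ((s.toList.length : Nat) : Int) st q = _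
    unfold pvStepA
    rw [pv_count_eq (s :: t) (s :: t).length s.toList.length q hp]
  calc get_max_visible_asteroids (s :: t)
      = (((PySem.List.pyRange 0 (((s :: t).length : Nat) : Int) 1).foldl (fun st i =>
            (PySem.List.pyRange 0 (PySem.Str.len s) 1).foldl (fun st j =>
              pvStepA (s :: t) (((s :: t).length : Nat) : Int) (PySem.Str.len s) st (i, j)) st)
            ((0 : Int), (none : Option (Int × Int)))).1,
         ((PySem.List.pyRange 0 (((s :: t).length : Nat) : Int) 1).foldl (fun st i =>
            (PySem.List.pyRange 0 (PySem.Str.len s) 1).foldl (fun st j =>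
              pvStepA (s :: t) (((s :: t).length : Nat) : Int) (PySem.Str.len s) st (i, j)) st)
            ((0 : Int), (none : Option (Int × Int)))).2.getD (0, 0)) := rfl
    _ = (((PySem.List.pyRange 0 (((s :: t).length : Nat) : Int) 1).foldl (fun st i =>
            (PySem.List.pyRange 0 ((s.toList.length : Nat) : Int) 1).foldl (fun st j =>
              pvStepA (s :: t) (((s :: t).length : Nat) : Int) ((s.toList.length : Nat) : Int) st (i, j)) st)
            ((0 : Int), (none : Option (Int × Int)))).1,
         ((PySem.List.pyRange 0 (((s :: t).length : Nat) : Int) 1).foldl (fun st i =>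
            (PySem.List.pyRange 0 ((s.toList.length : Nat) : Int) 1).foldl (fun st j =>
              pvStepA (s :: t) (((s :: t).length : Nat) : Int) ((s.toList.length : Nat) : Int) st (i, j)) st)
            ((0 : Int), (none : Option (Int × Int)))).2.getD (0, 0)) := by
        rw [PySem.Str.len_eq]
    _ = (((pvCells (s :: t).length s.toList.length).foldl
            (pvStepA (s :: t) (((s :: t).length : Nat) : Int) ((s.toList.length : Nat) : Int))
            ((0 : Int), (none : Option (Int × Int)))).1,
         ((pvCells (s :: t).length s.toList.length).foldl
            (pvStepA (s :: t) (((s :: t).length : Nat) : Int) ((s.toList.length : Nat) : Int))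
            ((0 : Int), (none : Option (Int × Int)))).2.getD (0, 0)) := by
        rw [pv_nested_foldl (s :: t).length s.toList.length
          (pvStepA (s :: t) (((s :: t).length : Nat) : Int) ((s.toList.length : Nat) : Int))
          ((0 : Int), (none : Option (Int × Int)))]
    _ = ((((pvCells (s :: t).length s.toList.length).filter
            (fun q => decide (pvCellA (s :: t) q.1 q.2 = some FULL))).foldl
            (pvStepA (s :: t) (((s :: t).length : Nat) : Int) ((s.toList.length : Nat) : Int))
            ((0 : Int), (none : Option (Int × Int)))).1,
         (((pvCells (s :: t).length s.toList.length).filter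
            (fun q => decide (pvCellA (s :: t) q.1 q.2 = some FULL))).foldl
            (pvStepA (s :: t) (((s :: t).length : Nat) : Int) ((s.toList.length : Nat) : Int))
            ((0 : Int), (none : Option (Int × Int)))).2.getD (0, 0)) := by
        rw [pv_skip (s :: t) (((s :: t).length : Nat) : Int) ((s.toList.length : Nat) : Int)
          (pvCells (s :: t).length s.toList.length) ((0 : Int), (none : Option (Int × Int)))
          (le_refl 0)]
    _ = get_max_visible_asteroids_alt (s :: t) := by
        rw [hfold]
        have hB : get_max_visible_asteroids_alt (s :: t)
            = ((((PySem.List.enumerate (s :: t) 0).flatMap (fun ir =>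
                  (PySem.List.enumerate (PySem.Chars.slice ir.2.toList none (some (PySem.Str.len s))) 0).filterMap
                    (fun jc => if jc.2 = '#' then some (ir.1, jc.1) else none))).foldl
                  (fun st p => if pvVisible ((PySem.List.enumerate (s :: t) 0).flatMap (fun ir =>
                      (PySem.List.enumerate (PySem.Chars.slice ir.2.toList none (some (PySem.Str.len s))) 0).filterMap
                        (fun jc => if jc.2 = '#' then some (ir.1, jc.1) else none))) p > st.1
                    then (pvVisible ((PySem.List.enumerate (s :: t) 0).flatMap (fun ir =>
                      (PySem.List.enumerate (PySem.Chars.slice ir.2.toList none (some (PySem.Str.len s))) 0).filterMap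
                        (fun jc => if jc.2 = '#' then some (ir.1, jc.1) else none))) p, some p) else st)
                  ((0 : Int), (none : Option (Int × Int)))).1,
               (((PySem.List.enumerate (s :: t) 0).flatMap (fun ir =>
                  (PySem.List.enumerate (PySem.Chars.slice ir.2.toList none (some (PySem.Str.len s))) 0).filterMap
                    (fun jc => if jc.2 = '#' then some (ir.1, jc.1) else none))).foldl
                  (fun st p => if pvVisible ((PySem.List.enumerate (s :: t) 0).flatMap (fun ir =>
                      (PySem.List.enumerate (PySem.Chars.slice ir.2.toList none (some (PySem.Str.len s))) 0).filterMap
                        (fun jc => if jc.2 = '#' then some (ir.1, jc.1) else none))) p > st.1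
                    then (pvVisible ((PySem.List.enumerate (s :: t) 0).flatMap (fun ir =>
                      (PySem.List.enumerate (PySem.Chars.slice ir.2.toList none (some (PySem.Str.len s))) 0).filterMap
                        (fun jc => if jc.2 = '#' then some (ir.1, jc.1) else none))) p, some p) else st)
                  ((0 : Int), (none : Option (Int × Int)))).2.getD (0, 0)) := rfl
        rw [hB, PySem.Str.len_eq, pv_asts_eq s t hwle']
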